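-- pv_equiv track=rewrite | github.com/ProzorroUKR/standards | index_build.py | find_versions
-- ===== SOURCE A (Python) =====
-- from collections import defaultdict
--
-- LANG_CODES = ("en", "uk", "ru", "ro")
--
-- def find_versions(file_names):
--     versions = defaultdict(list)
--     for name, full_name in file_names:
--         options = []
--         name_parts = name.split(".")
--
--         name = ".".join(name_parts[:-1])
--         options.extend(name_parts[-1:])
--
--         if name.endswith("_pretty"):
--             name = name[:-7]
--             options.append("pretty")
--
--         if name.endswith("_annotated"):
--             name = name[:-10]
--             options.append("annotated")
--
--         if name[-2:] in LANG_CODES: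
--             options.append(name[-2:])
--             name = name[:-2]
--
--         versions[name].append(
--             (".".join(reversed(options)), full_name)
--         )
--     return versions
-- ===== SOURCE B (Python) =====
-- LANG_CODES = ("en", "uk", "ru", "ro")
--
--
-- def _parse(name):
--     # split off the extension at the last dot (no dot: empty residual key)
--     dot = name.rfind(".")
--     if dot < 0:
--         stem, opts = "", name
--     else:
--         stem, opts = name[:dot], name[dot + 1:]
--     # build the option string front-to-back by prepending, instead of a list
--     # that is reversed and joined at the end
--     if stem.endswith("_pretty"):
--         stem, opts = stem[:-7], "pretty." + opts
--     if stem.endswith("_annotated"):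
--         stem, opts = stem[:-10], "annotated." + opts
--     if stem[-2:] in LANG_CODES:
--         stem, opts = stem[:-2], stem[-2:] + "." + opts
--     return stem, opts
--
--
-- def find_versions(file_names):
--     parsed = [(_parse(name), full_name) for name, full_name in file_names]
--     order = list(dict.fromkeys(stem for (stem, _), _ in parsed))
--     return {key: [(opts, full_name) for (stem, opts), full_name in parsed if stem == key]
--             for key in order}
-- ===== Notes on version B (the rewrite author's own statement) =====
-- stated objective: alternative
-- what changed: B finds the extension with rfind on the last dot instead of split/rejoin, builds the option string front-to-back by prepending tokens instead of appending to a list that is reversed and dot-joined at the end, and groups results by deduplicating the parsed keys and filtering the parsed list per key instead of appending into a defaultdict.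
import Mathlib
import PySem

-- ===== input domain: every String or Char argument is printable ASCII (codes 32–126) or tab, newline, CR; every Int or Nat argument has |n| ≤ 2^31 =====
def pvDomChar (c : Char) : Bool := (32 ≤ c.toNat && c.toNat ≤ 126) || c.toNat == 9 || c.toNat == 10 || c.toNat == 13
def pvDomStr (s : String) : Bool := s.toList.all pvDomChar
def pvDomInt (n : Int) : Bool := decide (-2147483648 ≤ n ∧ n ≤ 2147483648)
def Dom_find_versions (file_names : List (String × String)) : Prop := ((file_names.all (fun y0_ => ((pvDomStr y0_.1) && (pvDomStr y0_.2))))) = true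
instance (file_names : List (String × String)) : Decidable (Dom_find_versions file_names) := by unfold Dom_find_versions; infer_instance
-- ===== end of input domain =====

-- B re-implements the parse with rfind + string prepends (no list/reverse/join) and
-- groups by dedup-then-filter instead of a defaultdict; alternative structure, same cost class.

-- ===== PORT A =====
def LANG_CODES : List String := ["en", "uk", "ru", "ro"]

def find_versions_step (versions : PySem.Dict String (List (String × String)))
    (p : String × String) : PySem.Dict String (List (String × String)) :=
  let name := p.1
  let full_name := p.2
  let name_parts := (PySem.Str.split? name ".").getD []
  let name1 := PySem.Str.join "." (PySem.List.slice name_parts none (some (-1)))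
  let options : List String := [] ++ PySem.List.slice name_parts (some (-1)) none
  let np : String × List String :=
    if PySem.Str.endswith name1 "_pretty" then
      (PySem.Str.slice name1 none (some (-7)), options ++ ["pretty"])
    else (name1, options)
  let na : String × List String :=
    if PySem.Str.endswith np.1 "_annotated" then
      (PySem.Str.slice np.1 none (some (-10)), np.2 ++ ["annotated"])
    else np
  let last2 := PySem.Str.slice na.1 (some (-2)) none
  let nl : String × List String :=
    if LANG_CODES.contains last2 then
      (PySem.Str.slice na.1 none (some (-2)), na.2 ++ [last2])
    else na
  versions.modify nl.1 [] (fun v => v ++ [(PySem.Str.join "." nl.2.reverse, full_name)])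

def find_versions (file_names : List (String × String)) : List (String × List (String × String)) :=
  (file_names.foldl find_versions_step PySem.Dict.empty).items

-- ===== PORT B =====
def parse_alt (name : String) : String × String :=
  let dot := PySem.Str.rfind name "."
  let sp0 : String × String :=
    if dot < 0 then ("", name)
    else (PySem.Str.slice name none (some dot), PySem.Str.slice name (some (dot + 1)) none)
  let sp1 : String × String :=
    if PySem.Str.endswith sp0.1 "_pretty" then
      (PySem.Str.slice sp0.1 none (some (-7)), "pretty." ++ sp0.2)
    else sp0
  let sp2 : String × String :=
    if PySem.Str.endswith sp1.1 "_annotated" then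
      (PySem.Str.slice sp1.1 none (some (-10)), "annotated." ++ sp1.2)
    else sp1
  let last2 := PySem.Str.slice sp2.1 (some (-2)) none
  if LANG_CODES.contains last2 then
    (PySem.Str.slice sp2.1 none (some (-2)), last2 ++ "." ++ sp2.2)
  else sp2

def find_versions_alt (file_names : List (String × String)) : List (String × List (String × String)) :=
  let parsed := file_names.map (fun p => (parse_alt p.1, p.2))
  let order := PySem.List.dedup (parsed.map (fun q => q.1.1))
  order.map (fun key => (key, (parsed.filter (fun q => q.1.1 == key)).map (fun q => (q.1.2, q.2))))

-- ===== PRECONDITION & SPEC =====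
def Spec_find_versions (file_names : List (String × String)) (out : List (String × List (String × String))) : Prop := out = find_versions_alt file_names
instance (file_names : List (String × String)) (out : List (String × List (String × String))) : Decidable (Spec_find_versions file_names out) := by unfold Spec_find_versions; infer_instance

-- ===== CLAIM (what is proved, stated in full; the proofs are below) =====
def Claim_equal_find_versions : Prop := ∀ (file_names : List (String × String)), Dom_find_versions file_names → Spec_find_versions file_names (find_versions file_names)

-- ===== LEMMAS AND PROOFS =====

def split1 : List Char → List (List Char)
  | [] => [[]]
  | c :: t => if c = '.' then [] :: split1 t else
      match split1 t with
      | h :: r => (c :: h) :: r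
      | [] => [[c]]

theorem split1_ne_nil (cs : List Char) : split1 cs ≠ [] := by
  induction cs with
  | nil => simp [split1]
  | cons c t ih =>
    simp only [split1]
    split
    · simp
    · rcases h : split1 t with _ | ⟨h1, r⟩
      · exact absurd h ih
      · simp

theorem go_spec (fuel : Nat) (l cur : List Char) (acc : List (List Char))
    (hf : l.length ≤ fuel) :
    PySem.Chars.splitOn.go ['.'] fuel l cur acc =
      acc.reverse ++ (match split1 l with
        | h :: r => (cur.reverse ++ h) :: r
        | [] => [cur.reverse]) := by
  induction fuel generalizing l cur acc with
  | zero =>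
    have : l = [] := List.eq_nil_of_length_eq_zero (Nat.le_zero.mp hf)
    subst this
    simp [PySem.Chars.splitOn.go, split1]
  | succ n ih =>
    cases l with
    | nil => simp [PySem.Chars.splitOn.go, split1]
    | cons c rest =>
      simp only [PySem.Chars.splitOn.go]
      by_cases hc : c = '.'
      · subst hc
        rw [if_pos (by simp [List.isPrefixOf])]
        simp only [List.length_cons] at hf
        rw [ih _ [] _ (by simp; omega)]
        rcases h : split1 rest with _ | ⟨h1, r⟩
        · exact absurd h (split1_ne_nil rest)
        · simp [split1, h]
      · rw [if_neg (by simp [List.isPrefixOf]; exact fun h => hc h.symm)]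
        simp only [List.length_cons] at hf
        rw [ih rest (c :: cur) acc (by omega)]
        rcases h : split1 rest with _ | ⟨h1, r⟩
        · exact absurd h (split1_ne_nil rest)
        · simp [split1, h, hc]

theorem splitOn_eq_split1 (cs : List Char) : PySem.Chars.splitOn cs ['.'] = split1 cs := by
  rw [PySem.Chars.splitOn, go_spec _ _ _ _ (by omega)]
  rcases h : split1 cs with _ | ⟨h1, r⟩
  · exact absurd h (split1_ne_nil cs)
  · simp

theorem split1_no_dot (cs : List Char) (h : '.' ∉ cs) : split1 cs = [cs] := by
  induction cs with
  | nil => simp [split1]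
  | cons c t ih =>
    simp only [List.mem_cons, not_or] at h
    rw [split1, if_neg (fun hc => h.1 hc.symm), ih h.2]

theorem split1_append (as bs : List Char) (h : '.' ∉ bs) :
    split1 (as ++ '.' :: bs) = split1 as ++ [bs] := by
  induction as with
  | nil => simp [split1, split1_no_dot bs h]
  | cons a t ih =>
    by_cases ha : a = '.'
    · subst ha; simp [split1, ih]
    · simp only [List.cons_append, split1, if_neg ha, ih]
      rcases ht : split1 t with _ | ⟨h1, r⟩
      · exact absurd ht (split1_ne_nil t)
      · simp

theorem join_split1 (as : List Char) : PySem.Chars.join ['.'] (split1 as) = as := by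
  induction as with
  | nil => simp [split1, PySem.Chars.join, List.intercalate]
  | cons a t ih =>
    by_cases ha : a = '.'
    · subst ha
      rw [split1, if_pos rfl]
      rcases ht : split1 t with _ | ⟨h1, r⟩
      · exact absurd ht (split1_ne_nil t)
      · rw [PySem.Chars.join_cons_cons]
        rw [ht] at ih
        simp [ih]
    · rw [split1, if_neg ha]
      rcases ht : split1 t with _ | ⟨h1, r⟩
      · exact absurd ht (split1_ne_nil t)
      · rw [ht] at ih
        cases r with
        | nil => simpa [PySem.Chars.join_singleton] using congrArg (a :: ·) (by simpa [PySem.Chars.join_singleton] using ih)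
        | cons q r' =>
          rw [PySem.Chars.join_cons_cons]
          rw [PySem.Chars.join_cons_cons] at ih
          simp [← ih]

theorem rgo_no_dot (cs : List Char) (h : '.' ∉ cs) (k : Nat) :
    PySem.Chars.rfind.go cs ['.'] k = -1 := by
  induction k with
  | zero =>
    rw [PySem.Chars.rfind.go, if_neg]
    intro hp
    exact h ((List.isPrefixOf_iff_prefix.mp hp).subset (by simp))
  | succ j ih =>
    rw [PySem.Chars.rfind.go, if_neg, ih]
    intro hp
    exact h (List.mem_of_mem_drop ((List.isPrefixOf_iff_prefix.mp hp).subset (by simp)))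

theorem rgo_dot (as bs : List Char) (h : '.' ∉ bs) (k : Nat) (hk : as.length ≤ k) :
    PySem.Chars.rfind.go (as ++ '.' :: bs) ['.'] k = as.length := by
  induction k with
  | zero =>
    have : as = [] := List.eq_nil_of_length_eq_zero (Nat.le_zero.mp hk)
    subst this
    rw [PySem.Chars.rfind.go, if_pos (by simp [List.isPrefixOf])]
    simp
  | succ j ih =>
    rcases Nat.lt_or_ge j.succ as.length.succ with hlt | hge
    · -- j+1 ≤ as.length, combined with hk: as.length ≤ j+1 so equal
      have heq : as.length = j + 1 := le_antisymm hk (Nat.lt_succ_iff.mp hlt)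
      rw [PySem.Chars.rfind.go, if_pos]
      · omega
      · have : List.drop (j+1) (as ++ '.' :: bs) = '.' :: bs := by
          rw [← heq, List.drop_left]
        rw [this]
        simp [List.isPrefixOf]
    · -- j+1 > as.length: drop lands inside bs
      have hj : as.length ≤ j := by omega
      rw [PySem.Chars.rfind.go, if_neg, ih hj]
      intro hp
      have hmem : '.' ∈ List.drop (j+1) (as ++ '.' :: bs) :=
        (List.isPrefixOf_iff_prefix.mp hp).subset (by simp)
      have h1 : as ++ '.' :: bs = (as ++ ['.']) ++ bs := by simp
      have h2 : j + 1 = (as ++ ['.']).length + (j - as.length) := by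
        simp only [List.length_append, List.length_cons, List.length_nil]
        omega
      have hdb : '.' ∈ bs := by
        rw [h1, h2, List.drop_append] at hmem
        rcases List.mem_append.mp hmem with hx | hx
        · exact absurd hx (by simp [List.drop_eq_nil_of_le])
        · exact List.mem_of_mem_drop hx
      exact h hdb

theorem rfind_no_dot (cs : List Char) (h : '.' ∉ cs) : PySem.Chars.rfind cs ['.'] = -1 := by
  rw [PySem.Chars.rfind]; exact rgo_no_dot cs h _

theorem rfind_dot (as bs : List Char) (h : '.' ∉ bs) :
    PySem.Chars.rfind (as ++ '.' :: bs) ['.'] = as.length := by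
  rw [PySem.Chars.rfind]; exact rgo_dot as bs h _ (by simp)

theorem dot_decomp (cs : List Char) :
    '.' ∉ cs ∨ ∃ as bs, cs = as ++ '.' :: bs ∧ '.' ∉ bs := by
  induction cs with
  | nil => left; simp
  | cons c t ih =>
    rcases ih with h | ⟨as, bs, rfl, hbs⟩
    · by_cases hc : c = '.'
      · subst hc; right; exact ⟨[], t, rfl, h⟩
      · left; simp [h]; exact fun hcc => hc hcc.symm
    · right; exact ⟨c :: as, bs, rfl, hbs⟩

theorem str_join_single (a : String) : PySem.Str.join "." [a] = a := by
  rw [PySem.Str.join]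
  simp [PySem.Chars.join_singleton]

theorem str_join_cons (a b : String) (rest : List String) :
    PySem.Str.join "." (a :: b :: rest) = a ++ "." ++ PySem.Str.join "." (b :: rest) := by
  apply String.toList_inj.mp
  simp only [PySem.Str.join, String.toList_ofList, List.map_cons, String.toList_append]
  rw [PySem.Chars.join_cons_cons]

theorem parts_eq (name : String) :
    (PySem.Str.split? name ".").getD [] = (split1 name.toList).map String.ofList := by
  have hsep : (".":String).toList = ['.'] := rfl
  rw [PySem.Str.split?, hsep, PySem.Chars.split?, if_neg (by simp), splitOn_eq_split1]
  rfl

def stage0B (name : String) : String × String :=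
  if PySem.Str.rfind name "." < 0 then ("", name)
  else (PySem.Str.slice name none (some (PySem.Str.rfind name ".")),
        PySem.Str.slice name (some (PySem.Str.rfind name "." + 1)) none)

theorem stage0_fst (name : String) :
    PySem.Str.join "." (PySem.List.slice ((PySem.Str.split? name ".").getD []) none (some (-1))) =
      (stage0B name).1 := by
  have hsep : (".":String).toList = ['.'] := rfl
  rw [parts_eq, PySem.List.slice_to_neg_one]
  rcases dot_decomp name.toList with h | ⟨as, bs, hcs, hbs⟩
  · have hr : PySem.Str.rfind name "." = -1 := by rw [PySem.Str.rfind, hsep, rfind_no_dot _ h]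
    rw [stage0B, if_pos (by rw [hr]; norm_num)]
    rw [split1_no_dot _ h]
    apply String.toList_inj.mp
    simp [PySem.Str.join, PySem.Chars.join_nil]
  · have hr : PySem.Str.rfind name "." = (as.length : Int) := by
      rw [PySem.Str.rfind, hsep, hcs, rfind_dot _ _ hbs]
    rw [stage0B, if_neg (by rw [hr]; omega)]
    simp only
    apply String.toList_inj.mp
    rw [PySem.Str.toList_slice, hcs, hr, PySem.Chars.slice, PySem.List.slice_to_natCast,
      List.take_left, split1_append _ _ hbs]
    simp only [List.map_append, List.map_cons, List.map_nil, List.dropLast_concat]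
    rw [PySem.Str.toList_join]
    simp only [List.map_map]
    have : (String.toList ∘ String.ofList) = id := by funext l; simp
    rw [this, List.map_id, hsep]
    exact join_split1 as

theorem stage0_snd (name : String) :
    ([] ++ PySem.List.slice ((PySem.Str.split? name ".").getD []) (some (-1)) none) =
      [(stage0B name).2] := by
  have hsep : (".":String).toList = ['.'] := rfl
  rw [parts_eq, PySem.List.slice_from_neg_one]
  rcases dot_decomp name.toList with h | ⟨as, bs, hcs, hbs⟩
  · have hr : PySem.Str.rfind name "." = -1 := by rw [PySem.Str.rfind, hsep, rfind_no_dot _ h]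
    rw [stage0B, if_pos (by rw [hr]; norm_num)]
    rw [split1_no_dot _ h]
    simp [String.ofList_toList]
  · have hr : PySem.Str.rfind name "." = (as.length : Int) := by
      rw [PySem.Str.rfind, hsep, hcs, rfind_dot _ _ hbs]
    rw [stage0B, if_neg (by rw [hr]; omega)]
    simp only
    rw [hcs, split1_append _ _ hbs]
    simp only [List.map_append, List.map_cons, List.map_nil]
    have hlen : ((split1 as).map String.ofList ++ [String.ofList bs]).length - 1
        = ((split1 as).map String.ofList).length := by simp
    rw [hlen, List.drop_left, List.nil_append]
    congr 1
    apply String.toList_inj.mp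
    rw [PySem.Str.toList_slice, hcs, hr, PySem.Chars.slice,
      PySem.List.slice_from _ (by omega), String.toList_ofList]
    have : ((as.length : Int) + 1).toNat = as.length + 1 := by omega
    rw [this]
    have h1 : as ++ '.' :: bs = (as ++ ['.']) ++ bs := by simp
    have h2 : as.length + 1 = (as ++ ['.']).length := by simp
    rw [h1, h2, List.drop_left]
def chainA (st : String × List String) : String × List String :=
  let np : String × List String :=
    if PySem.Str.endswith st.1 "_pretty" then
      (PySem.Str.slice st.1 none (some (-7)), st.2 ++ ["pretty"])
    else st
  let na : String × List String :=
    if PySem.Str.endswith np.1 "_annotated" then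
      (PySem.Str.slice np.1 none (some (-10)), np.2 ++ ["annotated"])
    else np
  let last2 := PySem.Str.slice na.1 (some (-2)) none
  if LANG_CODES.contains last2 then
    (PySem.Str.slice na.1 none (some (-2)), na.2 ++ [last2])
  else na

def chainB (sp0 : String × String) : String × String :=
  let sp1 : String × String :=
    if PySem.Str.endswith sp0.1 "_pretty" then
      (PySem.Str.slice sp0.1 none (some (-7)), "pretty." ++ sp0.2)
    else sp0
  let sp2 : String × String :=
    if PySem.Str.endswith sp1.1 "_annotated" then
      (PySem.Str.slice sp1.1 none (some (-10)), "annotated." ++ sp1.2)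
    else sp1
  let last2 := PySem.Str.slice sp2.1 (some (-2)) none
  if LANG_CODES.contains last2 then
    (PySem.Str.slice sp2.1 none (some (-2)), last2 ++ "." ++ sp2.2)
  else sp2

theorem hpretty : ("pretty." : String) = "pretty" ++ "." := rfl
theorem hannot : ("annotated." : String) = "annotated" ++ "." := rfl

theorem chain_eq (sp : String × String) :
    ((chainA (sp.1, [sp.2])).1, PySem.Str.join "." (chainA (sp.1, [sp.2])).2.reverse) = chainB sp := by
  obtain ⟨stem, ext⟩ := sp
  simp only [chainA, chainB]
  split_ifs <;>
    simp_all [str_join_cons, str_join_single, hpretty, hannot, String.append_assoc]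

def pAraw (name : String) : String × List String :=
  let name_parts := (PySem.Str.split? name ".").getD []
  let name1 := PySem.Str.join "." (PySem.List.slice name_parts none (some (-1)))
  let options : List String := [] ++ PySem.List.slice name_parts (some (-1)) none
  let np : String × List String :=
    if PySem.Str.endswith name1 "_pretty" then
      (PySem.Str.slice name1 none (some (-7)), options ++ ["pretty"])
    else (name1, options)
  let na : String × List String :=
    if PySem.Str.endswith np.1 "_annotated" then
      (PySem.Str.slice np.1 none (some (-10)), np.2 ++ ["annotated"])
    else np
  let last2 := PySem.Str.slice na.1 (some (-2)) none
  if LANG_CODES.contains last2 then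
    (PySem.Str.slice na.1 none (some (-2)), na.2 ++ [last2])
  else na


theorem pAraw_eq_chainA (name : String) :
    pAraw name = chainA
      (PySem.Str.join "." (PySem.List.slice ((PySem.Str.split? name ".").getD []) none (some (-1))),
       [] ++ PySem.List.slice ((PySem.Str.split? name ".").getD []) (some (-1)) none) := rfl

theorem parse_eq (name : String) :
    ((pAraw name).1, PySem.Str.join "." (pAraw name).2.reverse) = parse_alt name := by
  have hB : parse_alt name = chainB (stage0B name) := rfl
  rw [pAraw_eq_chainA, hB, stage0_fst name, stage0_snd name]
  exact chain_eq (stage0B name)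

theorem step_eq (d : PySem.Dict String (List (String × String))) (p : String × String) :
    find_versions_step d p
      = d.modify (pAraw p.1).1 [] (fun v => v ++ [(PySem.Str.join "." (pAraw p.1).2.reverse, p.2)]) := rfl

theorem find_versions_eq (l : List (String × String)) :
    find_versions l =
      ((l.map (fun p => ((pAraw p.1).1, (PySem.Str.join "." (pAraw p.1).2.reverse, p.2)))).foldl
        (fun d q => d.modify q.1 [] (fun v => v ++ [q.2])) PySem.Dict.empty).items := by
  rw [find_versions]
  congr 1
  generalize PySem.Dict.empty = d
  induction l generalizing d with
  | nil => rfl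
  | cons p t ih =>
    simp only [List.map_cons, List.foldl_cons]
    rw [step_eq]
    exact ih _


theorem upd_ofList (xs : List String) :
    PySem.Set.update ([] : PySem.Set String) xs = PySem.Set.ofList xs := rfl

set_option maxHeartbeats 800000 in
theorem A_norm (l : List (String × String)) :
    find_versions l =
      (PySem.Set.ofList (l.map (fun p => (pAraw p.1).1))).map
        (fun k => (k, (l.filter (fun p => (pAraw p.1).1 == k)).map
          (fun p => (PySem.Str.join "." (pAraw p.1).2.reverse, p.2)))) := by
  rw [find_versions_eq]
  have hnodup : (((l.map (fun p => ((pAraw p.1).1, (PySem.Str.join "." (pAraw p.1).2.reverse, p.2)))).foldl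
      (fun d q => d.modify q.1 [] (fun v => v ++ [q.2]))
      (PySem.Dict.empty : PySem.Dict String (List (String × String)))).keys).Nodup :=
    PySem.Dict.nodup_keys_foldl_modify_key _ Prod.fst [] (fun _ q v => v ++ [q.2]) _
      (by rw [PySem.Dict.keys_empty]; exact List.nodup_nil)
  rw [PySem.Dict.items_eq_map_keys _ hnodup []]
  rw [PySem.Dict.keys_foldl_modify_key _ Prod.fst [] (fun _ q v => v ++ [q.2]) _,
    PySem.Dict.keys_empty]
  rw [List.map_map, upd_ofList]
  simp only [Function.comp_def]
  apply List.map_congr_left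
  intro k _
  rw [PySem.Dict.getD_foldl_modify_append _ _ k,
    PySem.Dict.getD_of_not_contains _ _ (PySem.Dict.contains_empty k)]
  rw [List.filter_map, List.map_map]
  simp only [Function.comp_def]
  rw [List.nil_append]

set_option maxHeartbeats 800000 in
theorem B_norm (l : List (String × String)) :
    find_versions_alt l =
      (PySem.Set.ofList (l.map (fun p => (parse_alt p.1).1))).map
        (fun k => (k, (l.filter (fun p => (parse_alt p.1).1 == k)).map
          (fun p => ((parse_alt p.1).2, p.2)))) := by
  rw [find_versions_alt]
  simp only [PySem.List.dedup_eq_ofList, List.map_map, List.filter_map, Function.comp_def]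

theorem key_eq (name : String) : (pAraw name).1 = (parse_alt name).1 := by
  have h := (Prod.ext_iff.mp (parse_eq name)).1
  simpa using h

theorem opt_eq (name : String) :
    PySem.Str.join "." (pAraw name).2.reverse = (parse_alt name).2 := by
  have h := (Prod.ext_iff.mp (parse_eq name)).2
  simpa using h

set_option maxHeartbeats 800000 in
theorem find_versions_spec' (l : List (String × String)) :
    find_versions l = find_versions_alt l := by
  rw [A_norm, B_norm]
  simp only [key_eq, opt_eq]

-- ===== VERDICT (by name: the statement is the Claim_ definition above) =====
theorem find_versions_spec : Claim_equal_find_versions := by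
  intro l _
  unfold Spec_find_versions
  exact find_versions_spec' l
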